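-- pv_equiv track=rewrite | github.com/HermanRoev/AoC23 | Day13/main.py | horizontal_mirror
-- ===== SOURCE A (Python) =====
-- def horizontal_mirror(pattern):
--     for i in range(len(pattern) - 1):
--         if pattern[i] == pattern[i + 1]:  # Check if two adjacent lines are the same
--             j = 1
--             while i - j >= 0 and i + 1 + j < len(pattern):
--                 if pattern[i - j] != pattern[i + 1 + j]:
--                     break  # Break if the mirroring condition fails
--                 j += 1
--             else:
--                 # Add the starting indices of the mirrored section
--                 return i+1
--     return 0
-- ===== SOURCE B (Python) =====
-- def horizontal_mirror(pattern):
--     # For each split position i, the reflection is valid iff the k rows above,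
--     # reversed, equal the k rows below, where k = min(i, n - i).
--     n = len(pattern)
--     for i in range(1, n):
--         k = min(i, n - i)
--         if pattern[i - k:i] == pattern[i:i + k][::-1]:
--             return i
--     return 0
-- ===== Notes on version B (the rewrite author's own statement) =====
-- stated objective: alternative
-- what changed: A expands outward from each adjacent-equal pair with an element-by-element while loop; B compares, for each split position, the slice above with the reversed slice below in one shot.
import Mathlib
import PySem

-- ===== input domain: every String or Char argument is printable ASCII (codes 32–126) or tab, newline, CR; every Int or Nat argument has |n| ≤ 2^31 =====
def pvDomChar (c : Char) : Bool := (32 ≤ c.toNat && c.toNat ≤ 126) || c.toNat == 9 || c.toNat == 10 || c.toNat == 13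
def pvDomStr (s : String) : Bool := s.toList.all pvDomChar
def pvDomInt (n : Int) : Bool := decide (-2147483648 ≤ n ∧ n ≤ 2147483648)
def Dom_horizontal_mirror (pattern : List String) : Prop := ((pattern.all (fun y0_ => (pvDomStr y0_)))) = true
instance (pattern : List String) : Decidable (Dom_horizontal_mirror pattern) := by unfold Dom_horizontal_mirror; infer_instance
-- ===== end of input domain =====

-- B replaces A's adjacency-guarded element-by-element expanding while-loop with one
-- slice/reverse comparison per split position (objective: alternative decomposition; same cost).

-- ===== PORT A =====
-- pattern[idx]: every access A makes is in range, so the default "" is never produced.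
def pvIx (pattern : List String) (idx : Int) : String := PySem.List.pyGetD pattern idx ""

-- the inner 'while … else' loop: true iff it finished without break
def pvAWhile (pattern : List String) (i j : Int) : Bool :=
  if h : 0 ≤ i - j ∧ i + 1 + j < (pattern.length : Int) then
    if pvIx pattern (i - j) ≠ pvIx pattern (i + 1 + j) then false
    else pvAWhile pattern i (j + 1)
  else true
termination_by ((pattern.length : Int) - (i + 1 + j)).toNat
decreasing_by omega

-- the 'for i in range(len(pattern) - 1)' loop with its early returns
def pvALoop (pattern : List String) : List Int → Int
  | [] => 0
  | i :: rest =>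
    if pvIx pattern i == pvIx pattern (i + 1) then
      if pvAWhile pattern i 1 then i + 1 else pvALoop pattern rest
    else pvALoop pattern rest

def horizontal_mirror (pattern : List String) : Int :=
  pvALoop pattern (PySem.List.pyRange 0 ((pattern.length : Int) - 1) 1)

-- ===== PORT B =====
-- the 'for i in range(1, n)' loop of Source B; [::-1] is List.reverse
def pvBLoop (pattern : List String) : List Int → Int
  | [] => 0
  | i :: rest =>
    let k : Int := min i ((pattern.length : Int) - i)
    if PySem.List.slice pattern (some (i - k)) (some i)
        == (PySem.List.slice pattern (some i) (some (i + k))).reverse then i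
    else pvBLoop pattern rest

def horizontal_mirror_alt (pattern : List String) : Int :=
  pvBLoop pattern (PySem.List.pyRange 1 (pattern.length : Int) 1)

-- ===== PRECONDITION & SPEC =====
def Spec_horizontal_mirror (pattern : List String) (out : Int) : Prop := out = horizontal_mirror_alt pattern
instance (pattern : List String) (out : Int) : Decidable (Spec_horizontal_mirror pattern out) := by unfold Spec_horizontal_mirror; infer_instance

-- ===== CLAIM (what is proved, stated in full; the proofs are below) =====
def Claim_equal_horizontal_mirror : Prop := ∀ (pattern : List String), Dom_horizontal_mirror pattern → Spec_horizontal_mirror pattern (horizontal_mirror pattern)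

-- ===== LEMMAS AND PROOFS =====

-- the mirror property at A-side index i (split between rows i and i+1)
def pvMir (pattern : List String) (i : Int) : Prop :=
  ∀ t : Int, 0 ≤ t → 0 ≤ i - t → i + 1 + t < (pattern.length : Int) →
    pvIx pattern (i - t) = pvIx pattern (i + 1 + t)

lemma pvGetCongr (pattern : List String) (a b : Nat) (hb : b < pattern.length) (hab : a = b) :
    pattern[a]'(hab ▸ hb) = pattern[b] := by subst hab; rfl

lemma pvAWhile_iff (pattern : List String) (i j : Int) :
    pvAWhile pattern i j = true ↔
      ∀ t : Int, j ≤ t → 0 ≤ i - t → i + 1 + t < (pattern.length : Int) →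
        pvIx pattern (i - t) = pvIx pattern (i + 1 + t) := by
  fun_induction pvAWhile pattern i j with
  | case1 j h hne =>
    simp only [Bool.false_eq_true, false_iff]
    intro hall; exact absurd (hall j le_rfl h.1 h.2) hne
  | case2 j h hne ih =>
    rw [ih]
    rw [not_not] at hne
    constructor
    · intro hall t ht h1 h2
      rcases eq_or_lt_of_le ht with rfl | hlt
      · exact hne
      · exact hall t (by omega) h1 h2
    · intro hall t ht h1 h2; exact hall t (by omega) h1 h2
  | case3 j h =>
    simp only [true_iff]
    intro t ht h1 h2; exfalso; omega

lemma pvAcheck_iff (pattern : List String) (i : Int) (h0 : 0 ≤ i) (h1 : i + 1 < (pattern.length : Int)) :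
    ((pvIx pattern i == pvIx pattern (i + 1)) && pvAWhile pattern i 1) = true ↔
      pvMir pattern i := by
  rw [Bool.and_eq_true, beq_iff_eq, pvAWhile_iff]
  constructor
  · rintro ⟨hadj, hall⟩ t ht hb1 hb2
    rcases eq_or_lt_of_le ht with rfl | hlt
    · simpa using hadj
    · exact hall t (by omega) hb1 hb2
  · intro hm
    refine ⟨?_, fun t ht hb1 hb2 => hm t (by omega) hb1 hb2⟩
    simpa using hm 0 le_rfl (by omega) (by omega)

lemma pvBcheck_iff (pattern : List String) (ni : Nat)
    (h1 : ni + 1 < pattern.length) :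
    (PySem.List.slice pattern (some (((ni:Int)+1) - min ((ni:Int)+1) ((pattern.length : Int) - ((ni:Int)+1)))) (some ((ni:Int)+1))
        == (PySem.List.slice pattern (some ((ni:Int)+1)) (some (((ni:Int)+1) + min ((ni:Int)+1) ((pattern.length : Int) - ((ni:Int)+1))))).reverse) = true ↔
      pvMir pattern (ni : Int) := by
  set K : Nat := min (ni+1) (pattern.length - (ni+1)) with hKdef
  have hK1 : K ≤ ni + 1 := Nat.min_le_left _ _
  have hK2 : K ≤ pattern.length - (ni+1) := Nat.min_le_right _ _
  have hcast : min ((ni:Int)+1) ((pattern.length : Int) - ((ni:Int)+1)) = (K:Int) := by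
    rw [hKdef]; push_cast [Nat.cast_min, Nat.cast_sub (le_of_lt h1)]; ring_nf
  rw [hcast]
  have e1 : ((ni:Int)+1) - (K:Int) = ((ni+1-K : Nat) : Int) := by push_cast [Nat.cast_sub hK1]; ring
  have e2 : ((ni:Int)+1) = (((ni+1:Nat)) : Int) := by push_cast; ring
  have e3 : ((ni:Int)+1) + (K:Int) = ((ni+1+K : Nat) : Int) := by push_cast; ring
  rw [e1, e3]
  rw [show (some ((ni:Int)+1)) = (some (((ni+1:Nat)):Int)) by rw [← e2]]
  rw [PySem.List.slice_natCast, PySem.List.slice_natCast]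
  rw [show (ni+1) - (ni+1-K) = K by omega, show (ni+1+K) - (ni+1) = K by omega]
  rw [beq_iff_eq]
  have hlenA : ((pattern.drop (ni+1-K)).take K).length = K := by
    simp [List.length_take, List.length_drop]; omega
  have hlenB : (((pattern.drop (ni+1)).take K).reverse).length = K := by
    simp [List.length_take, List.length_drop]; omega
  constructor
  · intro heq t ht hb1 hb2
    obtain ⟨tn, rfl⟩ : ∃ m : Nat, t = (m:Int) := ⟨t.toNat, (Int.toNat_of_nonneg ht).symm⟩
    have htn1 : tn ≤ ni := by exact_mod_cast (by omega : (tn:Int) ≤ (ni:Int))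
    have htn2 : ni + 1 + tn < pattern.length := by exact_mod_cast (by omega : ((ni:Int)+1+(tn:Int)) < (pattern.length:Int))
    have htnK : tn < K := by omega
    have hmA : K - 1 - tn < ((pattern.drop (ni+1-K)).take K).length := by omega
    have hstep := List.getElem_of_eq heq hmA
    rw [List.getElem_take, List.getElem_drop, List.getElem_reverse, List.getElem_take,
      List.getElem_drop] at hstep
    simp only [List.length_take, List.length_drop] at hstep
    rw [pvGetCongr pattern ((ni+1-K) + (K-1-tn)) (ni-tn) (by omega) (by omega),
        pvGetCongr pattern ((ni+1) + (min K (pattern.length - (ni+1)) - 1 - (K-1-tn))) (ni+1+tn) (by omega) (by omega)] at hstep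
    rw [pvIx, pvIx,
      show ((ni:Int) - (tn:Int)) = ((ni - tn : Nat) : Int) by push_cast [Nat.cast_sub htn1]; ring,
      show ((ni:Int) + 1 + (tn:Int)) = ((ni + 1 + tn : Nat) : Int) by push_cast; ring,
      PySem.List.pyGetD_natCast, PySem.List.pyGetD_natCast,
      List.getD_eq_getElem _ _ (by omega), List.getD_eq_getElem _ _ (by omega)]
    exact hstep
  · intro hm
    apply List.ext_getElem (by rw [hlenA, hlenB])
    intro m hmA hmB
    have hmK : m < K := by omega
    have hres := hm ((K:Int) - 1 - (m:Int)) (by omega) (by omega) (by omega)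
    rw [pvIx, pvIx,
      show ((ni:Int) - ((K:Int) - 1 - (m:Int))) = ((ni + 1 - K + m : Nat) : Int) by
        push_cast [Nat.cast_sub (by omega : K ≤ ni + 1 + m)]; ring_nf; omega,
      show ((ni:Int) + 1 + ((K:Int) - 1 - (m:Int))) = ((ni + 1 + (K - 1 - m) : Nat) : Int) by
        push_cast [Nat.cast_sub (by omega : 1 + m ≤ K)]; ring_nf; omega,
      PySem.List.pyGetD_natCast, PySem.List.pyGetD_natCast,
      List.getD_eq_getElem _ _ (by omega), List.getD_eq_getElem _ _ (by omega)] at hres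
    rw [List.getElem_take, List.getElem_drop, List.getElem_reverse, List.getElem_take,
      List.getElem_drop]
    simp only [List.length_take, List.length_drop]
    rw [pvGetCongr pattern ((ni+1) + (min K (pattern.length - (ni+1)) - 1 - m)) (ni+1+(K-1-m)) (by omega) (by omega)]
    exact hres

lemma pvIfIf (c1 c2 : Bool) (x y : Int) :
    (if c1 then if c2 then x else y else y) = if c1 && c2 then x else y := by
  cases c1 <;> cases c2 <;> simp

lemma pvLoop_eq_aux (pattern : List String) : ∀ (M : Nat) (a : Int), 0 ≤ a →
    ((pattern.length : Int) - 1 - a).toNat ≤ M →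
    pvALoop pattern (PySem.List.pyRange a ((pattern.length : Int) - 1) 1) =
      pvBLoop pattern (PySem.List.pyRange (a + 1) (pattern.length : Int) 1) := by
  intro M
  induction M with
  | zero =>
    intro a ha hM
    rw [PySem.List.pyRange_one_eq_nil (by omega), PySem.List.pyRange_one_eq_nil (by omega)]
    rfl
  | succ M ih =>
    intro a ha hM
    by_cases hend : (pattern.length : Int) - 1 ≤ a
    · rw [PySem.List.pyRange_one_eq_nil (by omega), PySem.List.pyRange_one_eq_nil (by omega)]
      rfl
    · obtain ⟨na, rfl⟩ : ∃ m : Nat, a = (m:Int) := ⟨a.toNat, (Int.toNat_of_nonneg ha).symm⟩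
      have hlen : na + 1 < pattern.length := by
        exact_mod_cast (by omega : ((na:Int)+1) < (pattern.length:Int))
      conv_lhs => rw [PySem.List.pyRange_one_cons (show (na:Int) < (pattern.length:Int) - 1 by omega)]
      conv_rhs => rw [PySem.List.pyRange_one_cons (show (na:Int) + 1 < (pattern.length:Int) by omega)]
      simp only [pvALoop, pvBLoop]
      rw [pvIfIf]
      have hrec := ih ((na:Int) + 1) (by omega) (by omega)
      by_cases hmir : pvMir pattern (na : Int)
      · rw [if_pos ((pvAcheck_iff pattern (na:Int) (by omega) (by omega)).mpr hmir),
            if_pos ((pvBcheck_iff pattern na hlen).mpr hmir)]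
      · rw [if_neg (fun h => hmir ((pvAcheck_iff pattern (na:Int) (by omega) (by omega)).mp h)),
            if_neg (fun h => hmir ((pvBcheck_iff pattern na hlen).mp h))]
        exact hrec

-- ===== VERDICT (by name: the statement is the Claim_ definition above) =====
theorem horizontal_mirror_spec : Claim_equal_horizontal_mirror := by
  intro pattern _
  unfold Spec_horizontal_mirror horizontal_mirror horizontal_mirror_alt
  simpa using pvLoop_eq_aux pattern ((pattern.length : Int) - 1 - 0).toNat 0 le_rfl le_rfl
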